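-- pv_equiv track=rewrite | github.com/abaldeg/EjerciciosPython | tp 5 ej 12.py | fExtraerDigito
-- ===== SOURCE A (Python) =====
-- def fExtraerDigito(d,e):
--
--     resultado = -1
--
--     while d > 0 :
--
--       da = d % 10
--
--       if da == e:
--
--           resultado = da
--
--       d = d // 10
--
--     return resultado
-- ===== SOURCE B (Python) =====
-- def fExtraerDigito(d, e):
--     # String-based digit extraction: build the set of decimal digits of d
--     # from str(d) and test e against it (digit-wise, never by substring).
--     if d <= 0 or e < 0 or e > 9:
--         return -1
--     digits = {int(c) for c in str(d)}
--     return e if e in digits else -1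
-- ===== Notes on version B (the rewrite author's own statement) =====
-- stated objective: idiomatic
-- what changed: B replaces A's arithmetic mod/div digit-peeling loop (with a carried 'resultado' accumulator) by an early range guard plus a set of digit characters built from str(d), tested by set membership.
import Mathlib
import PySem

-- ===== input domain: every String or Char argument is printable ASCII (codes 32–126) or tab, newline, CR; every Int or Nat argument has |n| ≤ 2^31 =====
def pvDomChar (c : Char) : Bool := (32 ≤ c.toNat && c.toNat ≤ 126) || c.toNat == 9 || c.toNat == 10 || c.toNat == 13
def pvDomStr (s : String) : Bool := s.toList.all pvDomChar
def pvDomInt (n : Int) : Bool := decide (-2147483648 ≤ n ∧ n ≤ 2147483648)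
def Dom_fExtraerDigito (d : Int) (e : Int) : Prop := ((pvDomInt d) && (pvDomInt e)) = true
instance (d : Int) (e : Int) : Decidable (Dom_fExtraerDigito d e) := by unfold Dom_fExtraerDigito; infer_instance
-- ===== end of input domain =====

-- B replaces A's arithmetic mod/div digit-peeling loop by a range guard plus
-- membership of e in the set of digits read off str(d); equal return values everywhere.


-- ===== PORT A =====
-- while d > 0: da = d % 10; if da == e: resultado = da; d = d // 10
def fExtraerDigitoLoop (d e resultado : Int) : Int :=
  if _h : d > 0 then
    let da := PySem.Int.mod d 10
    let resultado' := if da = e then da else resultado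
    fExtraerDigitoLoop (PySem.Int.floordiv d 10) e resultado'
  else resultado
termination_by d.toNat
decreasing_by
  rw [PySem.Int.floordiv_eq_ediv_of_pos (by norm_num)]
  omega

def fExtraerDigito (d : Int) (e : Int) : Int :=
  fExtraerDigitoLoop d e (-1)

-- ===== PORT B =====
-- int(c) for a single decimal-digit character c (exact there; str(d) of a
-- positive d consists of decimal digits only)
def pyIntOfDigitChar (c : Char) : Int := (c.toNat : Int) - 48

def fExtraerDigito_alt (d : Int) (e : Int) : Int :=
  if d ≤ 0 ∨ e < 0 ∨ e > 9 then -1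
  else
    let digits : PySem.Set Int :=
      PySem.Set.ofList ((PySem.Int.toStr d).toList.map pyIntOfDigitChar)
    if PySem.Set.contains digits e then e else -1

-- ===== PRECONDITION & SPEC =====
def Spec_fExtraerDigito (d : Int) (e : Int) (out : Int) : Prop := out = fExtraerDigito_alt d e
instance (d : Int) (e : Int) (out : Int) : Decidable (Spec_fExtraerDigito d e out) := by unfold Spec_fExtraerDigito; infer_instance

-- ===== CLAIM (what is proved, stated in full; the proofs are below) =====
def Claim_equal_fExtraerDigito : Prop := ∀ (d : Int) (e : Int), Dom_fExtraerDigito d e → Spec_fExtraerDigito d e (fExtraerDigito d e)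

-- ===== LEMMAS AND PROOFS =====

-- A's loop returns e iff e occurs among the decimal digits of d, else the accumulator.
theorem loop_eq (n : Nat) : ∀ (d e r : Int), d.toNat = n →
    fExtraerDigitoLoop d e r =
      if ∃ k ∈ Nat.digits 10 d.toNat, (k : Int) = e then e else r := by
  induction n using Nat.strong_induction_on with
  | _ n ih =>
    intro d e r hn
    rw [fExtraerDigitoLoop]
    by_cases hd : d > 0
    · rw [dif_pos hd]
      have hmod : PySem.Int.mod d 10 = ((d.toNat % 10 : Nat) : Int) := by
        rw [PySem.Int.mod_eq_emod_of_pos (by norm_num)]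
        omega
      have hdiv : (PySem.Int.floordiv d 10).toNat = d.toNat / 10 := by
        rw [PySem.Int.floordiv_eq_ediv_of_pos (by norm_num)]
        omega
      have hpos : 0 < d.toNat := by omega
      have hlt : d.toNat / 10 < n := by omega
      rw [ih _ hlt _ e _ hdiv, hmod, hdiv, Nat.digits_def' (by norm_num : 1 < 10) hpos]
      by_cases htl : ∃ k ∈ Nat.digits 10 (d.toNat / 10), (k : Int) = e
      · have h1 : ∃ k ∈ d.toNat % 10 :: Nat.digits 10 (d.toNat / 10), (k : Int) = e := by
          obtain ⟨k, hk, hke⟩ := htl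
          exact ⟨k, List.mem_cons_of_mem _ hk, hke⟩
        rw [if_pos htl, if_pos h1]
      · rw [if_neg htl]
        by_cases he : ((d.toNat % 10 : Nat) : Int) = e
        · have h1 : ∃ k ∈ d.toNat % 10 :: Nat.digits 10 (d.toNat / 10), (k : Int) = e :=
            ⟨d.toNat % 10, List.mem_cons_self, he⟩
          rw [if_pos he, if_pos h1, he]
        · have h1 : ¬ ∃ k ∈ d.toNat % 10 :: Nat.digits 10 (d.toNat / 10), (k : Int) = e := by
            rintro ⟨k, hk, hke⟩
            rcases List.mem_cons.mp hk with h | h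
            · exact he (h ▸ hke)
            · exact htl ⟨k, h, hke⟩
          rw [if_neg he, if_neg h1]
    · have h0 : d.toNat = 0 := by omega
      rw [dif_neg hd, h0]
      simp

-- Nat.toDigitsCore with enough fuel produces the reversed digit characters before l.
theorem toDigitsCore_eq (f : Nat) : ∀ (n : Nat) (l : List Char), n < f → 0 < n →
    Nat.toDigitsCore 10 f n l =
      ((Nat.digits 10 n).map Nat.digitChar).reverse ++ l := by
  induction f with
  | zero => intro n l h _; omega
  | succ f ih =>
    intro n l hf hn
    rw [Nat.toDigitsCore]
    by_cases h : n / 10 = 0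
    · have hlt : n < 10 := by omega
      have : Nat.digits 10 n = [n] := by
        rw [Nat.digits_def' (by norm_num : 1 < 10) hn, Nat.mod_eq_of_lt hlt, h]
        simp
      simp [h, this, Nat.mod_eq_of_lt hlt]
    · have h1 : n / 10 < f := by omega
      have h2 : 0 < n / 10 := Nat.pos_of_ne_zero h
      simp only [h, ih (n / 10) _ h1 h2]
      rw [Nat.digits_def' (by norm_num : 1 < 10) hn]
      simp

theorem pyIntOfDigitChar_digitChar (k : Nat) (hk : k < 10) :
    pyIntOfDigitChar (Nat.digitChar k) = (k : Int) := by
  interval_cases k <;> decide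

-- membership in B's digit list ↔ e occurs among the decimal digits of d (d > 0)
theorem mem_digits_set (d : Int) (hd : 0 < d) (e : Int) :
    (e ∈ ((PySem.Int.toStr d).toList.map pyIntOfDigitChar)) ↔
      ∃ k ∈ Nat.digits 10 d.toNat, (k : Int) = e := by
  rw [PySem.Int.toList_toStr]
  unfold PySem.Int.toChars
  rw [if_neg (by omega : ¬ d < 0)]
  unfold Nat.toDigits
  rw [toDigitsCore_eq (d.toNat + 1) d.toNat [] (by omega) (by omega)]
  rw [List.append_nil, List.map_reverse, List.mem_reverse, List.map_map]
  constructor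
  · intro h
    obtain ⟨k, hk, hke⟩ := List.mem_map.mp h
    have hk10 : k < 10 := Nat.digits_lt_base (by norm_num) hk
    exact ⟨k, hk, by rw [← hke, Function.comp_apply, pyIntOfDigitChar_digitChar k hk10]⟩
  · rintro ⟨k, hk, hke⟩
    have hk10 : k < 10 := Nat.digits_lt_base (by norm_num) hk
    exact List.mem_map.mpr ⟨k, hk, by rw [Function.comp_apply, pyIntOfDigitChar_digitChar k hk10, hke]⟩

theorem digit_range (e : Int) (n : Nat)
    (h : ∃ k ∈ Nat.digits 10 n, (k : Int) = e) : 0 ≤ e ∧ e ≤ 9 := by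
  obtain ⟨k, hk, hke⟩ := h
  have : k < 10 := Nat.digits_lt_base (by norm_num) hk
  omega

theorem main_eq (d e : Int) : fExtraerDigitoLoop d e (-1) = fExtraerDigito_alt d e := by
  unfold fExtraerDigito_alt
  rw [loop_eq d.toNat d e (-1) rfl]
  by_cases hg : d ≤ 0 ∨ e < 0 ∨ e > 9
  · have hA : ¬ ∃ k ∈ Nat.digits 10 d.toNat, (k : Int) = e := by
      rcases hg with h | h
      · have h0 : d.toNat = 0 := by omega
        rw [h0]; simp
      · intro hm; have := digit_range e d.toNat hm; omega
    rw [if_neg hA, if_pos hg]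
  · have hdpos : 0 < d := by omega
    rw [if_neg hg]
    by_cases hm : ∃ k ∈ Nat.digits 10 d.toNat, (k : Int) = e
    · have hmem := (mem_digits_set d hdpos e).mpr hm
      rw [if_pos hm]
      simp only []
      rw [if_pos (by simpa [PySem.Set.contains, PySem.Set.mem_ofList] using hmem)]
    · have hmem := fun h => hm ((mem_digits_set d hdpos e).mp h)
      rw [if_neg hm]
      simp only []
      rw [if_neg (by simpa [PySem.Set.contains, PySem.Set.mem_ofList] using hmem)]

-- ===== VERDICT (by name: the statement is the Claim_ definition above) =====
theorem fExtraerDigito_spec : Claim_equal_fExtraerDigito := by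
  intro d e _
  unfold Spec_fExtraerDigito fExtraerDigito
  exact main_eq d e
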